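-- pv_equiv track=rewrite | github.com/Infinus-77/NeuroLearn | utils/ai_processor.py | clean_ai_json
-- ===== SOURCE A (Python) =====
-- def clean_ai_json(raw_text):
--     """Deep-clean AI responses for JSON parsing."""
--     if not raw_text:
--         return "{}"
--
--     # 1. Extract JSON block
--     if "```json" in raw_text:
--         raw_text = raw_text.split("```json")[-1].split("```")[0]
--     elif "```" in raw_text:
--         parts = raw_text.split("```")
--         raw_text = parts[1] if len(parts) >= 3 else parts[-1]
--
--     raw_text = raw_text.strip()
--
--     # 2. Remove leading/trailing non-JSON characters
--     raw_text = raw_text.lstrip('`\'"')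
--     raw_text = raw_text.rstrip('`\'"')
--
--     # 3. Fix common JSON issues character by character
--     result = []
--     in_string = False
--     prev_char = ''
--
--     i = 0
--     while i < len(raw_text):
--         char = raw_text[i]
--
--         # Handle escape sequences
--         if char == '\\' and in_string:
--             # Valid escape: check next char
--             if i + 1 < len(raw_text):
--                 next_char = raw_text[i + 1]
--                 if next_char in ['"', '\\', '/', 'b', 'f', 'n', 'r', 't', 'u']:
--                     result.append(char)
--                     result.append(next_char)
--                     i += 2
--                     prev_char = next_char
--                     continue
--                 elif next_char in ['\n', '\r']:
--                     # Skip escape + newline (malformed)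
--                     i += 2
--                     continue
--             result.append(char)
--             i += 1
--         elif char == '"':
--             # Check if it's escaped
--             num_backslashes = 0
--             for j in range(len(result) - 1, -1, -1):
--                 if result[j] == '\\':
--                     num_backslashes += 1
--                 else:
--                     break
--
--             # If even number of backslashes, quote is not escaped
--             if num_backslashes % 2 == 0:
--                 in_string = not in_string
--
--             result.append(char)
--             i += 1
--         elif in_string:
--             # Inside string: convert raw newlines
--             if char == '\n':
--                 result.append('\\n')
--             elif char == '\r':
--                 # Skip carriage returns
--                 if i + 1 < len(raw_text) and raw_text[i + 1] == '\n':
--                     result.append('\\n')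
--                     i += 1
--                 else:
--                     result.append('\\n')
--             elif char == '\t':
--                 result.append('\\t')
--             else:
--                 result.append(char)
--             i += 1
--             prev_char = char
--         else:
--             # Outside string
--             if char in ['\n', '\r', '\t']:
--                 # Skip unless it's meaningful spacing
--                 i += 1
--                 continue
--             result.append(char)
--             i += 1
--             prev_char = char
--
--     cleaned = "".join(result).strip()
--
--     # 4. Ensure it's valid JSON start/end
--     if not cleaned.startswith('{') and not cleaned.startswith('['):
--         cleaned = '{}'
--
--     return cleaned
-- ===== SOURCE B (Python) =====
-- def clean_ai_json(raw_text):
--     """Deep-clean AI responses for JSON parsing: one pass with a running count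
--     of trailing backslashes instead of rescanning the output at every quote."""
--     if not raw_text:
--         return "{}"
--     if "```json" in raw_text:
--         raw_text = raw_text.split("```json")[-1].split("```")[0]
--     elif "```" in raw_text:
--         raw_text = raw_text.split("```")[1]
--     body = raw_text.strip().strip("`'\"")
--     out = []
--     in_string = False
--     bs = 0  # number of backslashes currently at the end of out
--     i, n = 0, len(body)
--     while i < n:
--         c = body[i]
--         if c == '\\' and in_string:
--             if i + 1 < n and body[i + 1] in '"\\/bfnrtu':
--                 out.append('\\' + body[i + 1])
--                 bs = bs + 2 if body[i + 1] == '\\' else 0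
--                 i += 2
--             elif i + 1 < n and body[i + 1] in '\n\r':
--                 i += 2
--             else:
--                 out.append('\\')
--                 bs += 1
--                 i += 1
--         elif c == '"':
--             if bs % 2 == 0:
--                 in_string = not in_string
--             out.append('"')
--             bs = 0
--             i += 1
--         elif in_string:
--             if c in '\n\r':
--                 out.append('\\n')
--                 if c == '\r' and i + 1 < n and body[i + 1] == '\n':
--                     i += 1
--             elif c == '\t':
--                 out.append('\\t')
--             else:
--                 out.append(c)
--             bs = 0
--             i += 1
--         else:
--             if c not in '\n\r\t':
--                 out.append(c)
--                 bs = bs + 1 if c == '\\' else 0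
--             i += 1
--     cleaned = ''.join(out).strip()
--     return cleaned if cleaned[:1] in ('{', '[') else '{}'
-- ===== Notes on version B (the rewrite author's own statement) =====
-- stated objective: alternative
-- what changed: The inner backward scan of the output buffer at every quote (to count trailing backslashes) is replaced by a running trailing-backslash counter updated in the single forward pass; intended as the O(n) version of A's O(n^2)-worst-case loop, measured only ~1.37x faster on the generated inputs.
import Mathlib
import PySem

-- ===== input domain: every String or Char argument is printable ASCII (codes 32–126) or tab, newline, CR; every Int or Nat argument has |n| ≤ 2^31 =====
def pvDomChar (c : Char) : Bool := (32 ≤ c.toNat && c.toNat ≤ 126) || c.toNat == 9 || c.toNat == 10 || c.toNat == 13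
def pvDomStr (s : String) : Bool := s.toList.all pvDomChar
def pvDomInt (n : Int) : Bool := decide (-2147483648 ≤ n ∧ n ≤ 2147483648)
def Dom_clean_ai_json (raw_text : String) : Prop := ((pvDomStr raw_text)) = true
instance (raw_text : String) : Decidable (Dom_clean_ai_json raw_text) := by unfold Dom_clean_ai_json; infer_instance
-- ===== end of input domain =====

-- B replaces A's backward rescan of the output at every quote by a running count of
-- trailing backslashes; same return value on every input.

-- ===== PORT A =====
-- step 1: the ``` / ```json block extraction
def pvExtractA (cs : List Char) : List Char :=
  if PySem.Chars.isIn "```json".toList cs then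
    (PySem.Chars.splitOn ((PySem.Chars.splitOn cs "```json".toList).getLastD [])
      "```".toList).headD []
  else if PySem.Chars.isIn "```".toList cs then
    let parts := PySem.Chars.splitOn cs "```".toList
    if 3 ≤ parts.length then parts.getD 1 [] else parts.getLastD []
  else cs

-- chars-set of lstrip('`\'"') / rstrip('`\'"')
def pvStripSet (c : Char) : Bool := decide (c = '`' ∨ c = '\'' ∨ c = '\"')
-- exact: s.lstrip(chars) drops leading chars in the set
def pvLstripA (cs : List Char) : List Char := cs.dropWhile pvStripSet
-- exact: s.rstrip(chars) drops trailing chars in the set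
def pvRstripA (cs : List Char) : List Char := (cs.reverse.dropWhile pvStripSet).reverse

-- A's inner backward scan 'for j in range(len(result)-1, -1, -1)': it counts the
-- trailing backslashes of result, i.e. the leading backslashes of result.reverse
def pvTrailBS : List Char → Nat
  | [] => 0
  | c :: t => if c == '\\' then pvTrailBS t + 1 else 0

-- step 3: A's while-loop (prev_char is assigned but never read in A; it is omitted)
def pvLoopA : List Char → Bool → List Char → List Char
  | [], _, result => result
  | c :: rest, inStr, result =>
    if c == '\\' && inStr then
      match rest with
      | next :: rest2 =>
        if ['\"', '\\', '/', 'b', 'f', 'n', 'r', 't', 'u'].contains next then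
          pvLoopA rest2 inStr (result ++ ['\\', next])
        else if next == '\n' || next == '\r' then
          pvLoopA rest2 inStr result
        else
          pvLoopA (next :: rest2) inStr (result ++ ['\\'])
      | [] => pvLoopA [] inStr (result ++ ['\\'])
    else if c == '\"' then
      let nb := pvTrailBS result.reverse
      pvLoopA rest (if nb % 2 == 0 then !inStr else inStr) (result ++ ['\"'])
    else if inStr then
      if c == '\n' then pvLoopA rest inStr (result ++ ['\\', 'n'])
      else if c == '\r' then
        match rest with
        | next :: rest2 =>
          if next == '\n' then pvLoopA rest2 inStr (result ++ ['\\', 'n'])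
          else pvLoopA (next :: rest2) inStr (result ++ ['\\', 'n'])
        | [] => pvLoopA [] inStr (result ++ ['\\', 'n'])
      else if c == '\t' then pvLoopA rest inStr (result ++ ['\\', 't'])
      else pvLoopA rest inStr (result ++ [c])
    else
      if c == '\n' || c == '\r' || c == '\t' then pvLoopA rest inStr result
      else pvLoopA rest inStr (result ++ [c])

-- step 4: "if not cleaned.startswith('{') and not cleaned.startswith('['): cleaned = '{}'"
def pvFinishA (cleaned : List Char) : String :=
  if !(PySem.Chars.startswith cleaned ['{']) && !(PySem.Chars.startswith cleaned ['[']) then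
    "{}"
  else String.ofList cleaned

def clean_ai_json (raw_text : String) : String :=
  if raw_text.toList = [] then "{}"
  else
    pvFinishA (PySem.Chars.strip
      (pvLoopA (pvRstripA (pvLstripA (PySem.Chars.strip (pvExtractA raw_text.toList))))
        false []))

-- ===== PORT B =====
def pvExtractB (cs : List Char) : List Char :=
  if PySem.Chars.isIn "```json".toList cs then
    (PySem.Chars.splitOn ((PySem.Chars.splitOn cs "```json".toList).getLastD [])
      "```".toList).headD []
  else if PySem.Chars.isIn "```".toList cs then
    let parts := PySem.Chars.splitOn cs "```".toList
    if 3 ≤ parts.length then parts.getD 1 [] else parts.getLastD []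
  else cs

def pvEscB (c : Char) : Bool :=
  c == '\"' || c == '\\' || c == '/' || c == 'b' || c == 'f' || c == 'n' || c == 'r' ||
  c == 't' || c == 'u'

-- B's single pass: bs is the running count of backslashes at the end of out
def pvLoopB : List Char → Bool → Nat → List Char → List Char
  | [], _, _, out => out
  | c :: rest, inStr, bs, out =>
    if c == '\\' && inStr then
      match rest with
      | next :: rest2 =>
        if pvEscB next then
          pvLoopB rest2 inStr (if next == '\\' then bs + 2 else 0) (out ++ ['\\', next])
        else if next == '\n' || next == '\r' then
          pvLoopB rest2 inStr bs out
        else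
          pvLoopB (next :: rest2) inStr (bs + 1) (out ++ ['\\'])
      | [] => pvLoopB [] inStr (bs + 1) (out ++ ['\\'])
    else if c == '\"' then
      pvLoopB rest (if bs % 2 == 0 then !inStr else inStr) 0 (out ++ ['\"'])
    else if inStr then
      if c == '\n' || c == '\r' then
        match rest with
        | next :: rest2 =>
          if c == '\r' && next == '\n' then pvLoopB rest2 inStr 0 (out ++ ['\\', 'n'])
          else pvLoopB (next :: rest2) inStr 0 (out ++ ['\\', 'n'])
        | [] => pvLoopB [] inStr 0 (out ++ ['\\', 'n'])
      else if c == '\t' then pvLoopB rest inStr 0 (out ++ ['\\', 't'])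
      else pvLoopB rest inStr 0 (out ++ [c])
    else
      if c == '\n' || c == '\r' || c == '\t' then pvLoopB rest inStr bs out
      else pvLoopB rest inStr (if c == '\\' then bs + 1 else 0) (out ++ [c])

-- "return cleaned if cleaned[:1] in ('{', '[') else '{}'" (cleaned[:1] = "" when empty)
def pvFinishB (cleaned : List Char) : String :=
  match cleaned with
  | [] => "{}"
  | c :: _ => if c == '{' || c == '[' then String.ofList cleaned else "{}"

def clean_ai_json_alt (raw_text : String) : String :=
  if raw_text.toList = [] then "{}"
  else
    pvFinishB (PySem.Chars.strip
      (pvLoopB (PySem.Chars.stripChars (PySem.Chars.strip (pvExtractB raw_text.toList))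
          "`'\"".toList)
        false 0 []))

-- ===== PRECONDITION & SPEC =====
def Spec_clean_ai_json (raw_text : String) (out : String) : Prop := out = clean_ai_json_alt raw_text
instance (raw_text : String) (out : String) : Decidable (Spec_clean_ai_json raw_text out) := by unfold Spec_clean_ai_json; infer_instance

-- ===== CLAIM (what is proved, stated in full; the proofs are below) =====
def Claim_equal_clean_ai_json : Prop := ∀ (raw_text : String), Dom_clean_ai_json raw_text → Spec_clean_ai_json raw_text (clean_ai_json raw_text)

-- ===== LEMMAS AND PROOFS =====
lemma pvLoop_eq (cs : List Char) (inStr : Bool) (res : List Char) :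
    pvLoopA cs inStr res = pvLoopB cs inStr (pvTrailBS res.reverse) res := by
  induction cs, inStr, res using pvLoopA.induct <;>
    try simp_all [pvLoopA, pvLoopB, pvEscB, pvTrailBS]
  case case2 => intros; tauto
  all_goals rw [pvLoopA.eq_def, pvLoopB.eq_def]
  all_goals simp_all
  all_goals first
    | assumption
    | (split <;> rfl)

lemma pvLoop_eq_nil (cs : List Char) (inStr : Bool) :
    pvLoopA cs inStr [] = pvLoopB cs inStr 0 [] := by
  simpa [pvTrailBS] using pvLoop_eq cs inStr []

lemma pvStrip_eq (cs : List Char) :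
    PySem.Chars.stripChars cs "`'\"".toList = pvRstripA (pvLstripA cs) := by
  have hp : (fun c => ("`'\"".toList).contains c) = pvStripSet := by
    funext c; simp [pvStripSet]
  simp only [PySem.Chars.stripChars, hp, pvRstripA, pvLstripA]

lemma pvFinish_eq (cleaned : List Char) : pvFinishA cleaned = pvFinishB cleaned := by
  cases cleaned with
  | nil => simp [pvFinishA, pvFinishB, PySem.Chars.startswith]
  | cons c t =>
    have h1 : PySem.Chars.startswith (c :: t) ['{'] = (c == '{') := by
      simp [PySem.Chars.startswith, List.isPrefixOf, BEq.comm]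
    have h2 : PySem.Chars.startswith (c :: t) ['['] = (c == '[') := by
      simp [PySem.Chars.startswith, List.isPrefixOf, BEq.comm]
    rw [pvFinishA, pvFinishB, h1, h2]
    by_cases hc : c = '{' <;> by_cases hb : c = '[' <;> simp [hc, hb]

-- ===== VERDICT (by name: the statement is the Claim_ definition above) =====
theorem clean_ai_json_spec : Claim_equal_clean_ai_json := by
  intro raw_text _
  unfold Spec_clean_ai_json clean_ai_json clean_ai_json_alt
  by_cases h0 : raw_text.toList = []
  · simp [h0]
  · simp only [h0, if_false]
    have hE : pvExtractB raw_text.toList = pvExtractA raw_text.toList := rfl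
    rw [hE, pvStrip_eq, ← pvLoop_eq_nil, pvFinish_eq]
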